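-- pv_equiv track=rewrite | github.com/NeckofNickey/algorithms | dynamic_programming/curious_turtle.py | get_shortest_ways_num
-- ===== SOURCE A (Python) =====
-- def get_shortest_ways_num(m, n, field):
--
--     # Считаем количество кратчайших путей для каждой точки на поле
--     dp_all_path = [[0] * n for _ in range(m)]
--     dp_all_path[0][0] = 1
--
--     for i in range(m):
--         for j in range(n):
--             if i > 0:
--                 dp_all_path[i][j] += dp_all_path[i - 1][j]
--             if j > 0:
--                 dp_all_path[i][j] += dp_all_path[i][j - 1]
--
--     # Считаем количество путей кратчайших путей, которые проходят только через нулевые точки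
--     dp_zero_path = [[0] * n for _ in range(m)]
--     dp_zero_path[0][0] = 1
--
--     for i in range(m):
--         for j in range(n):
--             if field[i][j] == 1:
--                 dp_zero_path[i][j] = 0
--                 continue
--             if i > 0:
--                 dp_zero_path[i][j] += dp_zero_path[i - 1][j]
--             if j > 0:
--                 dp_zero_path[i][j] += dp_zero_path[i][j - 1]
--
--     return dp_all_path[m - 1][n - 1] - dp_zero_path[m - 1][n - 1]
-- ===== SOURCE B (Python) =====
-- def get_shortest_ways_num(m, n, field):
--     # total monotone paths = C(m+n-2, m-1), built by the exact multiplicative formula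
--     total = 1
--     for k in range(1, m):
--         total = total * (n - 1 + k) // k
--     # obstacle-avoiding paths with a single rolling row instead of a full grid
--     row = [0] * n
--     for i in range(m):
--         for j in range(n):
--             if field[i][j] == 1:
--                 row[j] = 0
--             elif i == 0 and j == 0:
--                 row[j] = 1
--             elif j > 0:
--                 row[j] += row[j - 1]
--             # else (j == 0, i > 0): row[0] already holds the value from above
--     return total - row[n - 1]
-- ===== Notes on version B (the rewrite author's own statement) =====
-- stated objective: alternative
-- what changed: The all-paths DP grid is deleted in favour of the closed-form binomial C(m+n-2, m-1) computed by an exact multiplicative loop, and the obstacle-avoiding DP keeps a single rolling row instead of a full 2-D grid.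
import Mathlib
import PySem

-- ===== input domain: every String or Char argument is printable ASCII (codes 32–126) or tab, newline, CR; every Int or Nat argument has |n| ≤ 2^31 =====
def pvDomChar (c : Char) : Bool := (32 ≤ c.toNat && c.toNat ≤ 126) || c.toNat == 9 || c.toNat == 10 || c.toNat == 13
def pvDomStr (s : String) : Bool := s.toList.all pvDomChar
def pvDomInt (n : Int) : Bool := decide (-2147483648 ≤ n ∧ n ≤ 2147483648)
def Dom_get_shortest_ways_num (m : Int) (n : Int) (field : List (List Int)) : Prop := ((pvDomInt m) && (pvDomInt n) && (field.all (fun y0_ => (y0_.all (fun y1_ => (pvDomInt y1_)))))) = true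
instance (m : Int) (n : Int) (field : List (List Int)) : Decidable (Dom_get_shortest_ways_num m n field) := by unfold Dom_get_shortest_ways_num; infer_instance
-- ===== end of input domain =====

-- B replaces the first DP grid by the closed-form binomial C(m+n-2, m-1) (exact multiplicative loop)
-- and keeps only a single rolling row for the obstacle DP (alternative algorithm, same asymptotic time).

-- ===== PORT A =====
-- grid indexing helpers: Python `g[i][j]` / `g[i][j] = v` with in-range Nat indices (Pre_ guarantees range)
def pvGget (g : List (List Int)) (i j : Nat) : Int := (g.getD i []).getD j 0
def pvGset (g : List (List Int)) (i j : Nat) (v : Int) : List (List Int) :=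
  g.set i ((g.getD i []).set j v)

-- body of A's first double loop (all-paths DP)
def pvStepAll (dp : List (List Int)) (i j : Int) : List (List Int) :=
  let dp := if 0 < i then pvGset dp i.toNat j.toNat (pvGget dp i.toNat j.toNat + pvGget dp (i.toNat - 1) j.toNat) else dp
  if 0 < j then pvGset dp i.toNat j.toNat (pvGget dp i.toNat j.toNat + pvGget dp i.toNat (j.toNat - 1)) else dp

-- body of A's second double loop (obstacle-avoiding DP; `continue` = early result)
def pvStepZero (field dp : List (List Int)) (i j : Int) : List (List Int) :=
  if pvGget field i.toNat j.toNat == 1 then pvGset dp i.toNat j.toNat 0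
  else
    let dp := if 0 < i then pvGset dp i.toNat j.toNat (pvGget dp i.toNat j.toNat + pvGget dp (i.toNat - 1) j.toNat) else dp
    if 0 < j then pvGset dp i.toNat j.toNat (pvGget dp i.toNat j.toNat + pvGget dp i.toNat (j.toNat - 1)) else dp

def get_shortest_ways_num (m : Int) (n : Int) (field : List (List Int)) : Int :=
  let dpAll := (PySem.List.pyRange 0 m 1).foldl
    (fun dp i => (PySem.List.pyRange 0 n 1).foldl (fun dp j => pvStepAll dp i j) dp)
    (pvGset (List.replicate m.toNat (List.replicate n.toNat 0)) 0 0 1)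
  let dpZero := (PySem.List.pyRange 0 m 1).foldl
    (fun dp i => (PySem.List.pyRange 0 n 1).foldl (fun dp j => pvStepZero field dp i j) dp)
    (pvGset (List.replicate m.toNat (List.replicate n.toNat 0)) 0 0 1)
  pvGget dpAll (m - 1).toNat (n - 1).toNat - pvGget dpZero (m - 1).toNat (n - 1).toNat

-- ===== PORT B =====
-- body of B's rolling-row inner loop
def pvRowStep (field : List (List Int)) (row : List Int) (i j : Int) : List Int :=
  if pvGget field i.toNat j.toNat == 1 then row.set j.toNat 0
  else if i == 0 && j == 0 then row.set j.toNat 1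
  else if 0 < j then row.set j.toNat (row.getD j.toNat 0 + row.getD (j.toNat - 1) 0)
  else row

def get_shortest_ways_num_alt (m : Int) (n : Int) (field : List (List Int)) : Int :=
  let total := (PySem.List.pyRange 1 m 1).foldl
    (fun t k => PySem.Int.floordiv (t * (n - 1 + k)) k) 1
  let row := (PySem.List.pyRange 0 m 1).foldl
    (fun row i => (PySem.List.pyRange 0 n 1).foldl (fun row j => pvRowStep field row i j) row)
    (List.replicate n.toNat 0)
  total - row.getD (n - 1).toNat 0

-- ===== PRECONDITION & SPEC =====
-- Pre_ = exactly where A returns: m,n ≥ 1 and the first m rows of field each have ≥ n entries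
-- (otherwise Python A raises IndexError).
def Pre_get_shortest_ways_num (m : Int) (n : Int) (field : List (List Int)) : Prop :=
  1 ≤ m ∧ 1 ≤ n ∧ m ≤ (field.length : Int) ∧
    ∀ row ∈ field.take m.toNat, n ≤ (row.length : Int)
instance (m : Int) (n : Int) (field : List (List Int)) : Decidable (Pre_get_shortest_ways_num m n field) := by
  unfold Pre_get_shortest_ways_num; infer_instance

def pvWitness_get_shortest_ways_num : Int × Int × List (List Int) := (2, 3, [[0, 0, 0], [0, 1, 0]])

def Spec_get_shortest_ways_num (m : Int) (n : Int) (field : List (List Int)) (out : Int) : Prop := out = get_shortest_ways_num_alt m n field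
instance (m : Int) (n : Int) (field : List (List Int)) (out : Int) : Decidable (Spec_get_shortest_ways_num m n field out) := by unfold Spec_get_shortest_ways_num; infer_instance

-- ===== CLAIM (what is proved, stated in full; the proofs are below) =====
def Claim_equal_get_shortest_ways_num : Prop := ∀ (m : Int) (n : Int) (field : List (List Int)), Dom_get_shortest_ways_num m n field → Pre_get_shortest_ways_num m n field → Spec_get_shortest_ways_num m n field (get_shortest_ways_num m n field)

-- ===== LEMMAS AND PROOFS =====

-- generic list surgery -------------------------------------------------------

theorem pvAt_getD {α : Type} (v1 : List α) (x : α) (v2 : List α) (d : α) {t : Nat}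
    (h : v1.length = t) : (v1 ++ x :: v2).getD t d = x := by
  rw [List.getD_append_right _ _ _ _ (by omega)]
  simp [h]

theorem pvAt_set {α : Type} (v1 : List α) (x y : α) (v2 : List α) {t : Nat}
    (h : v1.length = t) : (v1 ++ x :: v2).set t y = v1 ++ y :: v2 := by
  subst h
  induction v1 with
  | nil => rfl
  | cons a l ih => simp [ih]

theorem pvLt_getD {α : Type} (v1 v2 : List α) (d : α) {k : Nat} (h : k < v1.length) :
    (v1 ++ v2).getD k d = v1.getD k d := List.getD_append _ _ _ _ h

theorem pvGetD_map_range {α : Type} (g : Nat → α) (d : α) {j N : Nat} (h : j < N) :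
    ((List.range N).map g).getD j d = g j := by
  rw [List.getD_eq_getElem _ _ (by simpa using h)]
  simp

theorem pvTake_map_range {α : Type} (g : Nat → α) {t N : Nat} (h : t ≤ N) :
    ((List.range N).map g).take t = (List.range t).map g := by
  rw [← List.map_take, List.take_range, Nat.min_eq_left h]

theorem pvTake_succ_map_range {α : Type} (g : Nat → α) {t N : Nat} (h : t < N) :
    ((List.range N).map g).take (t + 1) = ((List.range N).map g).take t ++ [g t] := by
  rw [pvTake_map_range g h, pvTake_map_range g (Nat.le_of_lt h), List.range_succ,
    List.map_append]
  simp

theorem pvDrop_cons (c : List Int) {t : Nat} (h : t < c.length) :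
    c.drop t = c.getD t 0 :: c.drop (t + 1) := by
  rw [List.drop_eq_getElem_cons h, List.getD_eq_getElem _ _ h]

-- grid surgery ---------------------------------------------------------------

theorem pvGget_at (pre : List (List Int)) (mid : List Int) (suf : List (List Int))
    {i : Nat} (h : pre.length = i) (j : Nat) :
    pvGget (pre ++ mid :: suf) i j = mid.getD j 0 := by
  unfold pvGget; rw [pvAt_getD _ _ _ _ h]

theorem pvGget_lt (pre rest : List (List Int)) {i : Nat} (h : i < pre.length) (j : Nat) :
    pvGget (pre ++ rest) i j = (pre.getD i []).getD j 0 := by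
  unfold pvGget; rw [pvLt_getD _ _ _ h]

theorem pvGset_at (pre : List (List Int)) (mid : List Int) (suf : List (List Int))
    {i : Nat} (h : pre.length = i) (j : Nat) (v : Int) :
    pvGset (pre ++ mid :: suf) i j v = pre ++ mid.set j v :: suf := by
  unfold pvGset; rw [pvAt_getD _ _ _ _ h, pvAt_set _ _ _ _ h]

-- reference values -----------------------------------------------------------

def pvAval (i j : Nat) : Int := ((i + j).choose i : Int)

def pvZval (f : List (List Int)) : Nat → Nat → Int
  | 0, 0 => if pvGget f 0 0 = 1 then 0 else 1
  | 0, j+1 => if pvGget f 0 (j+1) = 1 then 0 else pvZval f 0 j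
  | i+1, 0 => if pvGget f (i+1) 0 = 1 then 0 else pvZval f i 0
  | i+1, j+1 => if pvGget f (i+1) (j+1) = 1 then 0 else pvZval f i (j+1) + pvZval f (i+1) j

def pvAvals (N i : Nat) : List Int := (List.range N).map (pvAval i)

def pvZvals (f : List (List Int)) (N i : Nat) : List Int := (List.range N).map (pvZval f i)

theorem pvAvals_take {t N : Nat} (h : t ≤ N) (i : Nat) :
    (pvAvals N i).take t = (List.range t).map (pvAval i) := pvTake_map_range _ h

theorem pvAvals_take_succ {t N : Nat} (h : t < N) (i : Nat) :
    (pvAvals N i).take (t + 1) = (pvAvals N i).take t ++ [pvAval i t] :=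
  pvTake_succ_map_range _ h

theorem pvZvals_take {t N : Nat} (h : t ≤ N) (f : List (List Int)) (i : Nat) :
    (pvZvals f N i).take t = (List.range t).map (pvZval f i) := pvTake_map_range _ h

theorem pvZvals_take_succ {t N : Nat} (h : t < N) (f : List (List Int)) (i : Nat) :
    (pvZvals f N i).take (t + 1) = (pvZvals f N i).take t ++ [pvZval f i t] :=
  pvTake_succ_map_range _ h

def pvInit (M N : Nat) : List (List Int) :=
  pvGset (List.replicate M (List.replicate N 0)) 0 0 1

theorem pvInit_eq {M N : Nat} (h : 0 < M) :
    pvInit M N = ((List.replicate N 0).set 0 1) :: List.replicate (M-1) (List.replicate N 0) := by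
  obtain ⟨M0, rfl⟩ : ∃ M0, M = M0 + 1 := ⟨M - 1, by omega⟩
  simp [pvInit, pvGset, List.replicate_succ]

theorem pvInit_length (M N : Nat) : (pvInit M N).length = M := by
  simp [pvInit, pvGset]

-- inner loop, all-paths grid -------------------------------------------------

theorem pvInnerAll (N i : Nat) (pre suf : List (List Int)) (cur0 : List Int)
    (hpre : pre.length = i)
    (hprev : 0 < i → pre.getD (i-1) [] = pvAvals N (i-1))
    (hcur : cur0 = if i = 0 then (List.replicate N 0).set 0 1 else List.replicate N 0) :
    ∀ t, t ≤ N →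
      (List.range t).foldl (fun dp (j : Nat) => pvStepAll dp (i : Int) (j : Int)) (pre ++ cur0 :: suf)
        = pre ++ ((pvAvals N i).take t ++ cur0.drop t) :: suf := by
  have hvN : (pvAvals N i).length = N := by simp [pvAvals]
  have hcN : cur0.length = N := by
    rcases Nat.eq_zero_or_pos i with h0 | h0
    · simp [hcur, h0]
    · simp [hcur, Nat.pos_iff_ne_zero.mp h0]
  intro t
  induction t with
  | zero => intro _; simp
  | succ t ih =>
    intro h
    have htN : t < N := h
    rw [List.range_succ, List.foldl_append, ih (Nat.le_of_succ_le h)]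
    simp only [List.foldl_cons, List.foldl_nil]
    have hTlen : ((pvAvals N i).take t).length = t := by simp [hvN]; omega
    rw [pvDrop_cons cur0 (by omega), pvAvals_take_succ htN i]
    rw [show ((pvAvals N i).take t ++ [pvAval i t]) ++ cur0.drop (t+1)
          = (pvAvals N i).take t ++ pvAval i t :: cur0.drop (t+1) by simp]
    set T := (pvAvals N i).take t with hT
    set D := cur0.drop (t+1) with hD
    set ct := cur0.getD t 0 with hct
    -- goal: pvStepAll (pre ++ (T ++ ct :: D) :: suf) ↑i ↑t = pre ++ (T ++ pvAval i t :: D) :: suf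
    rcases i with _ | i0
    · -- i = 0 : first branch inactive
      have hcur' : cur0 = (List.replicate N 0).set 0 1 := by simpa using hcur
      rcases t with _ | t0
      · -- i = 0, t = 0 : nothing written, cell already 1
        have hct1 : ct = 1 := by
          obtain ⟨N0, rfl⟩ : ∃ N0, N = N0 + 1 := ⟨N - 1, by omega⟩
          simp [hct, hcur', List.replicate_succ]
        have : pvAval 0 0 = 1 := by simp [pvAval]
        simp [pvStepAll, hct1, this]
      · -- i = 0, t = t0+1 : only the left-neighbour addition fires
        have hct0 : ct = 0 := by
          obtain ⟨N0, rfl⟩ : ∃ N0, N = N0 + 1 := ⟨N - 1, by omega⟩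
          simp [hct, hcur', List.replicate_succ]
        have hget : pvGget (pre ++ (T ++ ct :: D) :: suf) 0 (t0+1) = ct :=
          (pvGget_at pre _ suf hpre _).trans (pvAt_getD _ _ _ _ hTlen)
        have hleft : pvGget (pre ++ (T ++ ct :: D) :: suf) 0 t0 = pvAval 0 t0 := by
          rw [pvGget_at pre _ suf hpre, pvLt_getD _ _ _ (by omega), hT,
            pvAvals_take (Nat.le_of_lt htN) 0, pvGetD_map_range _ _ (by omega)]
        have hval : pvAval 0 t0 = 1 := by simp [pvAval]
        have hval' : pvAval 0 (t0+1) = 1 := by simp [pvAval]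
        simp only [pvStepAll, Int.toNat_natCast, Nat.add_sub_cancel, show ¬((0:Int) < ((0:Nat):Int)) by simp,
          if_false, show (0:Int) < ((t0+1:Nat):Int) by exact_mod_cast Nat.succ_pos t0, if_true]
        rw [hget, hleft, pvGset_at pre _ suf hpre, pvAt_set _ _ _ _ hTlen, hct0, hval, hval']
        norm_num
    · -- i = i0+1
      have hcur' : cur0 = List.replicate N 0 := by simpa using hcur
      have hct0 : ct = 0 := by simp [hct, hcur']
      have hup : pvGget (pre ++ (T ++ ct :: D) :: suf) i0 t = pvAval i0 t := by
        rw [pvGget_lt pre _ (by omega), show pre.getD i0 [] = pvAvals N i0 by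
            simpa using hprev (Nat.succ_pos i0),
          pvAvals, pvGetD_map_range _ _ htN]
      have hget : pvGget (pre ++ (T ++ ct :: D) :: suf) (i0+1) t = ct :=
        (pvGget_at pre _ suf hpre _).trans (pvAt_getD _ _ _ _ hTlen)
      rcases t with _ | t0
      · -- t = 0 : only the upper-neighbour addition fires
        simp only [pvStepAll, Int.toNat_natCast, Nat.add_sub_cancel,
          show (0:Int) < ((i0+1:Nat):Int) by exact_mod_cast Nat.succ_pos i0, if_true,
          show ¬((0:Int) < ((0:Nat):Int)) by simp, if_false]
        rw [hget, hup, pvGset_at pre _ suf hpre, pvAt_set _ _ _ _ hTlen, hct0]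
        have : (0:Int) + pvAval i0 0 = pvAval (i0+1) 0 := by simp [pvAval]
        rw [this]
      · -- t = t0+1 : both additions fire
        simp only [pvStepAll, Int.toNat_natCast, Nat.add_sub_cancel,
          show (0:Int) < ((i0+1:Nat):Int) by exact_mod_cast Nat.succ_pos i0, if_true,
          show (0:Int) < ((t0+1:Nat):Int) by exact_mod_cast Nat.succ_pos t0, if_true]
        rw [hget, hup, pvGset_at pre _ suf hpre, pvAt_set _ _ _ _ hTlen]
        have hget2 : pvGget (pre ++ (T ++ (ct + pvAval i0 (t0+1)) :: D) :: suf) (i0+1) (t0+1)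
            = ct + pvAval i0 (t0+1) :=
          (pvGget_at pre _ suf hpre _).trans (pvAt_getD _ _ _ _ hTlen)
        have hleft : pvGget (pre ++ (T ++ (ct + pvAval i0 (t0+1)) :: D) :: suf) (i0+1) t0
            = pvAval (i0+1) t0 := by
          rw [pvGget_at pre _ suf hpre, pvLt_getD _ _ _ (by omega), hT,
            pvAvals_take (Nat.le_of_lt htN) (i0+1), pvGetD_map_range _ _ (by omega)]
        rw [hget2, hleft, pvGset_at pre _ suf hpre, pvAt_set _ _ _ _ hTlen]
        have hpascal : ct + pvAval i0 (t0+1) + pvAval (i0+1) t0 = pvAval (i0+1) (t0+1) := by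
          rw [hct0]
          show (0:Int) + ((i0 + (t0+1)).choose i0 : Int) + ((i0+1+t0).choose (i0+1) : Int)
              = ((i0+1+(t0+1)).choose (i0+1) : Int)
          rw [show i0+1+(t0+1) = (i0+t0+1)+1 by omega, Nat.choose_succ_succ',
            show i0 + (t0+1) = i0+t0+1 by omega, show i0+1+t0 = i0+t0+1 by omega]
          push_cast; ring
        rw [hpascal]

-- inner loop, obstacle grid --------------------------------------------------

theorem pvInnerZero (f : List (List Int)) (N i : Nat) (pre suf : List (List Int)) (cur0 : List Int)
    (hpre : pre.length = i)
    (hprev : 0 < i → pre.getD (i-1) [] = pvZvals f N (i-1))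
    (hcur : cur0 = if i = 0 then (List.replicate N 0).set 0 1 else List.replicate N 0) :
    ∀ t, t ≤ N →
      (List.range t).foldl (fun dp (j : Nat) => pvStepZero f dp (i : Int) (j : Int)) (pre ++ cur0 :: suf)
        = pre ++ ((pvZvals f N i).take t ++ cur0.drop t) :: suf := by
  have hvN : (pvZvals f N i).length = N := by simp [pvZvals]
  have hcN : cur0.length = N := by
    rcases Nat.eq_zero_or_pos i with h0 | h0
    · simp [hcur, h0]
    · simp [hcur, Nat.pos_iff_ne_zero.mp h0]
  intro t
  induction t with
  | zero => intro _; simp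
  | succ t ih =>
    intro h
    have htN : t < N := h
    rw [List.range_succ, List.foldl_append, ih (Nat.le_of_succ_le h)]
    simp only [List.foldl_cons, List.foldl_nil]
    have hTlen : ((pvZvals f N i).take t).length = t := by simp [hvN]; omega
    rw [pvDrop_cons cur0 (by omega), pvZvals_take_succ htN f i]
    rw [show ((pvZvals f N i).take t ++ [pvZval f i t]) ++ cur0.drop (t+1)
          = (pvZvals f N i).take t ++ pvZval f i t :: cur0.drop (t+1) by simp]
    set T := (pvZvals f N i).take t with hT
    set D := cur0.drop (t+1) with hD
    set ct := cur0.getD t 0 with hct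
    have hget : pvGget (pre ++ (T ++ ct :: D) :: suf) i t = ct :=
      (pvGget_at pre _ suf hpre _).trans (pvAt_getD _ _ _ _ hTlen)
    by_cases hf : pvGget f i t = 1
    · -- obstacle: cell set to 0
      have hz : pvZval f i t = 0 := by
        rcases i with _ | i0 <;> rcases t with _ | t0 <;> simp [pvZval, hf]
      simp only [pvStepZero, Int.toNat_natCast, hf, beq_self_eq_true, if_true]
      rw [pvGset_at pre _ suf hpre, pvAt_set _ _ _ _ hTlen, hz]
    · have hfb : (pvGget f i t == 1) = false := by simpa using hf
      rcases i with _ | i0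
      · have hcur' : cur0 = (List.replicate N 0).set 0 1 := by simpa using hcur
        rcases t with _ | t0
        · -- (0,0), free: cell already 1
          have hct1 : ct = 1 := by
            obtain ⟨N0, rfl⟩ : ∃ N0, N = N0 + 1 := ⟨N - 1, by omega⟩
            simp [hct, hcur', List.replicate_succ]
          have hz : pvZval f 0 0 = 1 := by simp [pvZval, hf]
          simp [pvStepZero, hfb, hct1, hz]
        · -- (0, t0+1), free: left neighbour only
          have hct0 : ct = 0 := by
            obtain ⟨N0, rfl⟩ : ∃ N0, N = N0 + 1 := ⟨N - 1, by omega⟩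
            simp [hct, hcur', List.replicate_succ]
          have hleft : pvGget (pre ++ (T ++ ct :: D) :: suf) 0 t0 = pvZval f 0 t0 := by
            rw [pvGget_at pre _ suf hpre, pvLt_getD _ _ _ (by omega), hT,
              pvZvals_take (Nat.le_of_lt htN) f 0, pvGetD_map_range _ _ (by omega)]
          have hz : pvZval f 0 (t0+1) = pvZval f 0 t0 := by simp [pvZval, hf]
          simp only [pvStepZero, Int.toNat_natCast, Nat.add_sub_cancel, hfb, Bool.false_eq_true, if_false,
            show ¬((0:Int) < ((0:Nat):Int)) by simp,
            show (0:Int) < ((t0+1:Nat):Int) by exact_mod_cast Nat.succ_pos t0, if_true]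
          rw [hget, hleft, pvGset_at pre _ suf hpre, pvAt_set _ _ _ _ hTlen, hct0, hz]
          norm_num
      · have hcur' : cur0 = List.replicate N 0 := by simpa using hcur
        have hct0 : ct = 0 := by simp [hct, hcur']
        have hup : pvGget (pre ++ (T ++ ct :: D) :: suf) i0 t = pvZval f i0 t := by
          rw [pvGget_lt pre _ (by omega), show pre.getD i0 [] = pvZvals f N i0 by
              simpa using hprev (Nat.succ_pos i0),
            pvZvals, pvGetD_map_range _ _ htN]
        rcases t with _ | t0
        · -- (i0+1, 0), free: upper neighbour only
          have hz : pvZval f (i0+1) 0 = pvZval f i0 0 := by simp [pvZval, hf]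
          simp only [pvStepZero, Int.toNat_natCast, Nat.add_sub_cancel, hfb, Bool.false_eq_true, if_false,
            show (0:Int) < ((i0+1:Nat):Int) by exact_mod_cast Nat.succ_pos i0, if_true,
            show ¬((0:Int) < ((0:Nat):Int)) by simp]
          rw [hget, hup, pvGset_at pre _ suf hpre, pvAt_set _ _ _ _ hTlen, hct0, hz]
          norm_num
        · -- (i0+1, t0+1), free: both neighbours
          simp only [pvStepZero, Int.toNat_natCast, Nat.add_sub_cancel, hfb, Bool.false_eq_true, if_false,
            show (0:Int) < ((i0+1:Nat):Int) by exact_mod_cast Nat.succ_pos i0, if_true,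
            show (0:Int) < ((t0+1:Nat):Int) by exact_mod_cast Nat.succ_pos t0]
          rw [hget, hup, pvGset_at pre _ suf hpre, pvAt_set _ _ _ _ hTlen]
          have hget2 : pvGget (pre ++ (T ++ (ct + pvZval f i0 (t0+1)) :: D) :: suf) (i0+1) (t0+1)
              = ct + pvZval f i0 (t0+1) :=
            (pvGget_at pre _ suf hpre _).trans (pvAt_getD _ _ _ _ hTlen)
          have hleft : pvGget (pre ++ (T ++ (ct + pvZval f i0 (t0+1)) :: D) :: suf) (i0+1) t0
              = pvZval f (i0+1) t0 := by
            rw [pvGget_at pre _ suf hpre, pvLt_getD _ _ _ (by omega), hT,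
              pvZvals_take (Nat.le_of_lt htN) f (i0+1),
              pvGetD_map_range _ _ (by omega)]
          rw [hget2, hleft, pvGset_at pre _ suf hpre, pvAt_set _ _ _ _ hTlen]
          have hz : ct + pvZval f i0 (t0+1) + pvZval f (i0+1) t0 = pvZval f (i0+1) (t0+1) := by
            have : pvZval f (i0+1) (t0+1) = pvZval f i0 (t0+1) + pvZval f (i0+1) t0 := by
              simp [pvZval, hf]
            rw [this, hct0]
            ring
          rw [hz]

-- inner loop, B's rolling row ------------------------------------------------

theorem pvRowStep_nat (f : List (List Int)) (row : List Int) (i j : Nat) :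
    pvRowStep f row (i : Int) (j : Int)
      = if pvGget f i j = 1 then row.set j 0
        else if i = 0 ∧ j = 0 then row.set j 1
        else if 0 < j then row.set j (row.getD j 0 + row.getD (j - 1) 0)
        else row := by
  unfold pvRowStep
  simp only [Int.toNat_natCast, beq_iff_eq, Bool.and_eq_true,
    Int.natCast_eq_zero, Int.natCast_pos]

theorem pvInnerB (f : List (List Int)) (N i : Nat) (row0 : List Int)
    (hrow : row0 = if i = 0 then List.replicate N 0 else pvZvals f N (i-1)) :
    ∀ t, t ≤ N →
      (List.range t).foldl (fun r (j : Nat) => pvRowStep f r (i : Int) (j : Int)) row0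
        = (pvZvals f N i).take t ++ row0.drop t := by
  have hvN : (pvZvals f N i).length = N := by simp [pvZvals]
  have hrN : row0.length = N := by
    rcases Nat.eq_zero_or_pos i with h0 | h0
    · simp [hrow, h0]
    · simp [hrow, Nat.pos_iff_ne_zero.mp h0, pvZvals]
  intro t
  induction t with
  | zero => intro _; simp
  | succ t ih =>
    intro h
    have htN : t < N := h
    rw [List.range_succ, List.foldl_append, ih (Nat.le_of_succ_le h)]
    simp only [List.foldl_cons, List.foldl_nil]
    have hTlen : ((pvZvals f N i).take t).length = t := by simp [hvN]; omega
    rw [pvDrop_cons row0 (by omega), pvZvals_take_succ htN f i]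
    rw [show ((pvZvals f N i).take t ++ [pvZval f i t]) ++ row0.drop (t+1)
          = (pvZvals f N i).take t ++ pvZval f i t :: row0.drop (t+1) by simp]
    set T := (pvZvals f N i).take t with hT
    set D := row0.drop (t+1) with hD
    set rt := row0.getD t 0 with hrt
    have hget : (T ++ rt :: D).getD t 0 = rt := pvAt_getD _ _ _ _ hTlen
    have hup : rt = if i = 0 then 0 else pvZval f (i-1) t := by
      rcases Nat.eq_zero_or_pos i with h0 | h0
      · simp [hrt, hrow, h0]
      · rw [hrt, hrow, if_neg (Nat.pos_iff_ne_zero.mp h0),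
          if_neg (Nat.pos_iff_ne_zero.mp h0)]
        unfold pvZvals
        exact pvGetD_map_range _ _ htN
    rw [pvRowStep_nat]
    by_cases hf : pvGget f i t = 1
    · have hz : pvZval f i t = 0 := by
        rcases i with _ | i0 <;> rcases t with _ | t0 <;> simp [pvZval, hf]
      rw [if_pos hf, pvAt_set _ _ _ _ hTlen, hz]
    · rw [if_neg hf]
      rcases i with _ | i0
      · rcases t with _ | t0
        · -- (0,0) free: set to 1
          have hz : pvZval f 0 0 = 1 := by simp [pvZval, hf]
          rw [if_pos ⟨rfl, rfl⟩, pvAt_set _ _ _ _ hTlen, hz]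
        · -- (0, t0+1) free: rt + left with rt = 0
          have hz : pvZval f 0 (t0+1) = pvZval f 0 t0 := by simp [pvZval, hf]
          have hleft : (T ++ rt :: D).getD t0 0 = pvZval f 0 t0 := by
            rw [pvLt_getD _ _ _ (by omega), hT,
              pvZvals_take (Nat.le_of_lt htN) f 0, pvGetD_map_range _ _ (by omega)]
          rw [if_neg (by omega), if_pos (Nat.succ_pos t0), hget, Nat.add_sub_cancel, hleft,
            pvAt_set _ _ _ _ hTlen, hup, if_pos rfl, hz]
          norm_num
      · have hupv : rt = pvZval f i0 t := by simpa using hup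
        rcases t with _ | t0
        · -- (i0+1, 0) free: row unchanged, head already holds the value from above
          have hz : pvZval f (i0+1) 0 = pvZval f i0 0 := by simp [pvZval, hf]
          rw [if_neg (by omega), if_neg (by omega), hz, ← hupv]
        · -- (i0+1, t0+1) free: rt + left
          have hleft : (T ++ rt :: D).getD t0 0 = pvZval f (i0+1) t0 := by
            rw [pvLt_getD _ _ _ (by omega), hT,
              pvZvals_take (Nat.le_of_lt htN) f (i0+1), pvGetD_map_range _ _ (by omega)]
          rw [if_neg (by omega), if_pos (Nat.succ_pos t0), hget, Nat.add_sub_cancel, hleft,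
            pvAt_set _ _ _ _ hTlen, hupv]
          have hz : pvZval f i0 (t0+1) + pvZval f (i0+1) t0 = pvZval f (i0+1) (t0+1) := by
            simp [pvZval, hf]
          rw [hz]

-- outer loops ----------------------------------------------------------------

theorem pvInit_drop (i : Nat) {M N : Nat} (hi : i < M) :
    (pvInit M N).drop i
      = (if i = 0 then (List.replicate N 0).set 0 1 else List.replicate N 0)
        :: (pvInit M N).drop (i + 1) := by
  rw [pvInit_eq (by omega)]
  rcases i with _ | i0
  · simp
  · simp only [List.drop_succ_cons, List.drop_replicate,
      show i0 + 1 ≠ 0 by omega, if_false]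
    rw [show M - 1 - i0 = (M - 1 - (i0 + 1)) + 1 by omega, List.replicate_succ]

theorem pvOuterAll {M N : Nat} :
    ∀ i, i ≤ M →
      (List.range i).foldl
        (fun dp (k : Nat) => (List.range N).foldl (fun dp (j : Nat) => pvStepAll dp (k : Int) (j : Int)) dp)
        (pvInit M N)
      = (List.range i).map (pvAvals N) ++ (pvInit M N).drop i := by
  intro i
  induction i with
  | zero => intro _; simp
  | succ i ih =>
    intro h
    have hiM : i < M := h
    rw [List.range_succ, List.foldl_append, ih (Nat.le_of_succ_le h)]
    simp only [List.foldl_cons, List.foldl_nil]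
    rw [pvInit_drop i hiM]
    rw [pvInnerAll N i ((List.range i).map (pvAvals N)) ((pvInit M N).drop (i + 1)) _
      (by simp) (fun hi => pvGetD_map_range _ _ (by omega)) rfl N (Nat.le_refl N)]
    have h1 : (pvAvals N i).take N = pvAvals N i :=
      List.take_of_length_le (by simp [pvAvals])
    have h2 : (if i = 0 then (List.replicate N (0:Int)).set 0 1 else List.replicate N (0:Int)).drop N
        = [] := by
      apply List.drop_eq_nil_of_le
      rcases Nat.eq_zero_or_pos i with h0 | h0
      · simp [h0]
      · simp [Nat.pos_iff_ne_zero.mp h0]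
    rw [h1, h2]
    simp

theorem pvOuterZero (f : List (List Int)) {M N : Nat} :
    ∀ i, i ≤ M →
      (List.range i).foldl
        (fun dp (k : Nat) => (List.range N).foldl (fun dp (j : Nat) => pvStepZero f dp (k : Int) (j : Int)) dp)
        (pvInit M N)
      = (List.range i).map (pvZvals f N) ++ (pvInit M N).drop i := by
  intro i
  induction i with
  | zero => intro _; simp
  | succ i ih =>
    intro h
    have hiM : i < M := h
    rw [List.range_succ, List.foldl_append, ih (Nat.le_of_succ_le h)]
    simp only [List.foldl_cons, List.foldl_nil]
    rw [pvInit_drop i hiM]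
    rw [pvInnerZero f N i ((List.range i).map (pvZvals f N)) ((pvInit M N).drop (i + 1)) _
      (by simp) (fun hi => pvGetD_map_range _ _ (by omega)) rfl N (Nat.le_refl N)]
    have h1 : (pvZvals f N i).take N = pvZvals f N i :=
      List.take_of_length_le (by simp [pvZvals])
    have h2 : (if i = 0 then (List.replicate N (0:Int)).set 0 1 else List.replicate N (0:Int)).drop N
        = [] := by
      apply List.drop_eq_nil_of_le
      rcases Nat.eq_zero_or_pos i with h0 | h0
      · simp [h0]
      · simp [Nat.pos_iff_ne_zero.mp h0]
    rw [h1, h2]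
    simp

theorem pvOuterB (f : List (List Int)) {N : Nat} :
    ∀ i : Nat,
      (List.range i).foldl
        (fun r (k : Nat) => (List.range N).foldl (fun r (j : Nat) => pvRowStep f r (k : Int) (j : Int)) r)
        (List.replicate N 0)
      = if i = 0 then List.replicate N 0 else pvZvals f N (i - 1) := by
  intro i
  induction i with
  | zero => simp
  | succ i ih =>
    rw [List.range_succ, List.foldl_append, ih]
    simp only [List.foldl_cons, List.foldl_nil]
    rw [pvInnerB f N i _ rfl N (Nat.le_refl N)]
    have h1 : (pvZvals f N i).take N = pvZvals f N i :=
      List.take_of_length_le (by simp [pvZvals])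
    have h2 : (if i = 0 then List.replicate N 0 else pvZvals f N (i - 1)).drop N = [] := by
      apply List.drop_eq_nil_of_le
      rcases Nat.eq_zero_or_pos i with h0 | h0
      · simp [h0]
      · simp [Nat.pos_iff_ne_zero.mp h0, pvZvals]
    rw [h1, h2]
    simp

-- the multiplicative binomial loop ------------------------------------------

theorem pvTotal {N : Nat} (hN : 0 < N) :
    ∀ K : Nat,
      (List.range K).foldl
        (fun t (k : Nat) => PySem.Int.floordiv (t * ((N : Int) - 1 + (1 + (k : Int)))) (1 + (k : Int))) 1
      = (((N - 1 + K).choose K : Nat) : Int) := by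
  intro K
  induction K with
  | zero => simp
  | succ K ih =>
    rw [List.range_succ, List.foldl_append, ih]
    simp only [List.foldl_cons, List.foldl_nil]
    have h1 : ((N : Int) - 1 + (1 + (K : Int))) = ((N + K : Nat) : Int) := by push_cast; ring
    have h2 : (1 + (K : Int)) = ((K + 1 : Nat) : Int) := by push_cast; ring
    rw [h1, h2, ← Nat.cast_mul, PySem.Int.floordiv_natCast]
    have e1 : N - 1 + K + 1 = N + K := by omega
    have key : (N - 1 + K).choose K * (N + K) = (N + K).choose (K + 1) * (K + 1) := by
      calc (N - 1 + K).choose K * (N + K)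
          = (N - 1 + K + 1) * (N - 1 + K).choose K := by rw [Nat.mul_comm, e1]
        _ = (N - 1 + K + 1).choose (K + 1) * (K + 1) := Nat.add_one_mul_choose_eq _ _
        _ = (N + K).choose (K + 1) * (K + 1) := by rw [e1]
    rw [key, Nat.mul_div_cancel _ (Nat.succ_pos K)]
    rw [show N - 1 + (K + 1) = N + K by omega]

-- ===== VERDICT (by name: the statement is the Claim_ definition above) =====
theorem get_shortest_ways_num_spec : Claim_equal_get_shortest_ways_num := by
  intro m n field hdom hpre
  unfold Spec_get_shortest_ways_num
  obtain ⟨hm, hn, -, -⟩ := hpre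
  lift m to Nat using (by omega) with M
  lift n to Nat using (by omega) with N
  have hM : 0 < M := by exact_mod_cast hm
  have hN : 0 < N := by exact_mod_cast hn
  have eM : ((M : Int) - 1).toNat = M - 1 := by omega
  have eN : ((N : Int) - 1).toNat = N - 1 := by omega
  simp only [get_shortest_ways_num, get_shortest_ways_num_alt]
  rw [PySem.List.pyRange_one 1 (M : Int)]
  simp only [PySem.List.pyRange_zero_natCast, List.foldl_map, Int.toNat_natCast, eM, eN]
  rw [show pvGset (List.replicate M (List.replicate N 0)) 0 0 1 = pvInit M N from rfl]
  rw [pvOuterAll M (Nat.le_refl M), pvOuterZero field M (Nat.le_refl M),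
    pvOuterB field M, pvTotal hN (M - 1)]
  have hdropM : (pvInit M N).drop M = [] := by
    apply List.drop_eq_nil_of_le
    simp [pvInit_length]
  rw [hdropM, List.append_nil, List.append_nil]
  rw [if_neg (by omega : ¬ M = 0)]
  unfold pvGget
  rw [pvGetD_map_range _ _ (by omega : M - 1 < M),
    pvGetD_map_range _ _ (by omega : M - 1 < M)]
  unfold pvAvals pvZvals
  rw [pvGetD_map_range _ _ (by omega : N - 1 < N),
    pvGetD_map_range _ _ (by omega : N - 1 < N)]
  unfold pvAval
  rw [show N - 1 + (M - 1) = M - 1 + (N - 1) by omega]
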